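-- pv_equiv track=rewrite | github.com/dmmiller/adventofcode | 2020/day7/solution.py | get_enclosing_bags_recursive
-- ===== SOURCE A (Python) =====
-- def get_enclosing_bags_recursive(bag_map, bag):
--     if bag not in bag_map:
--         return set()
--     valid_set = set()
--     for item in bag_map[bag]:
--         valid_set.add(item)
--         valid_set = valid_set.union(get_enclosing_bags_recursive(bag_map, item))
--     return valid_set
-- ===== SOURCE B (Python) =====
-- def get_enclosing_bags_recursive(bag_map, bag):
--     cache = {}
--
--     def rec(b):
--         if b in cache:
--             return cache[b]
--         result = set()
--         for item in bag_map.get(b, ()):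
--             result.add(item)
--             result |= rec(item)
--         cache[b] = result
--         return result
--
--     return rec(bag)
-- ===== Notes on version B (the rewrite author's own statement) =====
-- stated objective: alternative
-- what changed: B replaces A's naive recursion with caller-side set unions by a memoized depth-first search that threads a per-bag cache, so each bag's enclosing set is computed once and reused.
import Mathlib
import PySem

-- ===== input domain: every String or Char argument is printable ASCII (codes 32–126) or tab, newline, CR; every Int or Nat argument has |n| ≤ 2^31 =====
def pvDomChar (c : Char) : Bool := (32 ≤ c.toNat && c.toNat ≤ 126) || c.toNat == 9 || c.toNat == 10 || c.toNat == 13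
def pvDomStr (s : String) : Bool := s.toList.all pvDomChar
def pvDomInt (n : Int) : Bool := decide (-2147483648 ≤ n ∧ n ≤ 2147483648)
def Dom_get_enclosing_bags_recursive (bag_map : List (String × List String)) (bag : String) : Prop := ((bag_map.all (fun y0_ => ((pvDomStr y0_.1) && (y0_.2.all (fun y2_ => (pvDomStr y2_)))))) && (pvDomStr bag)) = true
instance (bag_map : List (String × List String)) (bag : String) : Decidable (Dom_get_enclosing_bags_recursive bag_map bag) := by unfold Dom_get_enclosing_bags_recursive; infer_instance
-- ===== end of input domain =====

-- B replaces A's naive recursion (caller-side set unions, re-exploring shared subgraphs)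
-- by a memoized depth-first search threading a per-bag cache (alternative decomposition).
-- Both functions return a Python set; equivalence is about the returned value.

-- children of a node: bag_map.get(b, []) — [] when b is not a key
def pvKids (bag_map : List (String × List String)) (b : String) : List String :=
  ((PySem.Dict.mk bag_map).get? b).getD []

-- ===== PORT A =====
-- A's self-recursion, fueled (the fuel bag_map.length + 1 is only a totality guard;
-- under Pre_ it is never exhausted — see pvA_stable below).
def pvRecA (bag_map : List (String × List String)) : Nat → String → PySem.Set String
  | 0, _ => PySem.Set.empty
  | f + 1, bag =>
    if (PySem.Dict.mk bag_map).contains bag = false then PySem.Set.empty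
    else
      (pvKids bag_map bag).foldl
        (fun valid_set item =>
          PySem.Set.union (PySem.Set.add valid_set item) (pvRecA bag_map f item))
        PySem.Set.empty

def get_enclosing_bags_recursive (bag_map : List (String × List String)) (bag : String) : List String :=
  pvRecA bag_map (bag_map.length + 1) bag

-- ===== PORT B =====
-- B's rec, fueled, threading the memo cache; returns (result, cache).
def pvRecB (bag_map : List (String × List String)) :
    Nat → PySem.Dict String (List String) → String → List String × PySem.Dict String (List String)
  | 0, cache, _ => (PySem.Set.empty, cache)
  | f + 1, cache, b =>
    match cache.get? b with
    | some s => (s, cache)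
    | none =>
      (((pvKids bag_map b).foldl
          (fun (acc : List String × PySem.Dict String (List String)) item =>
            (PySem.Set.union (PySem.Set.add acc.1 item) (pvRecB bag_map f acc.2 item).1,
             (pvRecB bag_map f acc.2 item).2))
          (PySem.Set.empty, cache)).1,
       (((pvKids bag_map b).foldl
          (fun (acc : List String × PySem.Dict String (List String)) item =>
            (PySem.Set.union (PySem.Set.add acc.1 item) (pvRecB bag_map f acc.2 item).1,
             (pvRecB bag_map f acc.2 item).2))
          (PySem.Set.empty, cache)).2).insert b
         (((pvKids bag_map b).foldl
          (fun (acc : List String × PySem.Dict String (List String)) item =>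
            (PySem.Set.union (PySem.Set.add acc.1 item) (pvRecB bag_map f acc.2 item).1,
             (pvRecB bag_map f acc.2 item).2))
          (PySem.Set.empty, cache)).1))

def get_enclosing_bags_recursive_alt (bag_map : List (String × List String)) (bag : String) : List String :=
  (pvRecB bag_map (bag_map.length + 1) PySem.Dict.empty bag).1

-- ===== PRECONDITION & SPEC =====
-- pvGrow n l = all nodes reachable from l in at most n steps (deduplicated each step)
def pvGrow (bag_map : List (String × List String)) : Nat → List String → List String
  | 0, l => l
  | n + 1, l => pvGrow bag_map n (PySem.Set.ofList (l ++ l.flatMap (pvKids bag_map)))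

-- nodes reachable from bag (including bag itself)
def pvReach (bag_map : List (String × List String)) (bag : String) : List String :=
  pvGrow bag_map (bag_map.length + 1) [bag]

-- nodes reachable from x in at least one step
def pvCyc (bag_map : List (String × List String)) (x : String) : List String :=
  pvGrow bag_map (bag_map.length + 1) (pvKids bag_map x)

-- Pre_: no cycle of the bag graph is reachable from bag — exactly the inputs on which A's
-- recursion terminates (on a reachable cycle Python A raises RecursionError, and B does too).
-- The two closure conjuncts state that the iterated successor sets are closed under one more
-- step; bag_map.length + 1 iterations always reach the closure, so they hold on every map.
def Pre_get_enclosing_bags_recursive (bag_map : List (String × List String)) (bag : String) : Prop :=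
  (∀ x ∈ pvReach bag_map bag, ∀ y ∈ pvKids bag_map x, y ∈ pvReach bag_map bag) ∧
  (∀ x ∈ pvReach bag_map bag,
     x ∉ pvCyc bag_map x ∧
     ∀ y ∈ pvCyc bag_map x, ∀ z ∈ pvKids bag_map y, z ∈ pvCyc bag_map x)

instance (bag_map : List (String × List String)) (bag : String) : Decidable (Pre_get_enclosing_bags_recursive bag_map bag) := by unfold Pre_get_enclosing_bags_recursive; infer_instance

def pvWitness_get_enclosing_bags_recursive : (List (String × List String)) × String :=
  ([("shiny gold", ["muted yellow", "bright white"]), ("muted yellow", ["bright white"])], "shiny gold")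

def Spec_get_enclosing_bags_recursive (bag_map : List (String × List String)) (bag : String) (out : List String) : Prop := out = get_enclosing_bags_recursive_alt bag_map bag
instance (bag_map : List (String × List String)) (bag : String) (out : List String) : Decidable (Spec_get_enclosing_bags_recursive bag_map bag out) := by unfold Spec_get_enclosing_bags_recursive; infer_instance

-- ===== CLAIM (what is proved, stated in full; the proofs are below) =====
def Claim_equal_get_enclosing_bags_recursive : Prop := ∀ (bag_map : List (String × List String)) (bag : String), Dom_get_enclosing_bags_recursive bag_map bag → Pre_get_enclosing_bags_recursive bag_map bag → Spec_get_enclosing_bags_recursive bag_map bag (get_enclosing_bags_recursive bag_map bag)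

-- ===== LEMMAS AND PROOFS =====

theorem pv_witness_ok :
    Dom_get_enclosing_bags_recursive pvWitness_get_enclosing_bags_recursive.1 pvWitness_get_enclosing_bags_recursive.2 ∧
    Pre_get_enclosing_bags_recursive pvWitness_get_enclosing_bags_recursive.1 pvWitness_get_enclosing_bags_recursive.2 := by
  decide

theorem pv_mem_grow_base (m : List (String × List String)) :
    ∀ (n : Nat) (l : List String) (x : String), x ∈ l → x ∈ pvGrow m n l := by
  intro n
  induction n with
  | zero => intro l x h; simpa [pvGrow] using h
  | succ n ih =>
    intro l x h
    simp only [pvGrow]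
    exact ih _ _ (by simp [PySem.Set.mem_ofList, h])

-- the invariant carried along A's/B's recursion: b is reachable, p is the (nodup) list of
-- ancestors, each ancestor is a key and reaches b in ≥ 1 step
def pvInv (m : List (String × List String)) (bag : String) (p : List String) (b : String) : Prop :=
  b ∈ pvReach m bag ∧ p.Nodup ∧
  (∀ x ∈ p, x ∈ pvReach m bag ∧ (PySem.Dict.mk m).contains x = true ∧ b ∈ pvCyc m x)

theorem pvInv_extend {m : List (String × List String)} {bag : String} {p : List String} {b c : String}
    (hPre : Pre_get_enclosing_bags_recursive m bag)
    (hInv : pvInv m bag p b) (hb : (PySem.Dict.mk m).contains b = true)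
    (hc : c ∈ pvKids m b) : pvInv m bag (b :: p) c := by
  obtain ⟨hbR, hnd, hanc⟩ := hInv
  refine ⟨(hPre.1 b hbR c hc), ?_, ?_⟩
  · refine List.nodup_cons.mpr ⟨fun hmem => ?_, hnd⟩
    exact (hPre.2 b hbR).1 ((hanc b hmem).2.2)
  · intro x hx
    rcases List.mem_cons.mp hx with hx | hx
    · subst hx
      exact ⟨hbR, hb, pv_mem_grow_base m _ _ c hc⟩
    · obtain ⟨hxR, hxc, hbx⟩ := hanc x hx
      exact ⟨hxR, hxc, (hPre.2 x hxR).2 b hbx c hc⟩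

theorem pvInv_length {m : List (String × List String)} {bag : String} {p : List String} {b : String}
    (hInv : pvInv m bag p b) : p.length ≤ m.length := by
  obtain ⟨-, hnd, hanc⟩ := hInv
  have hsub : p ⊆ (PySem.Dict.mk m).keys := by
    intro x hx
    have h := (hanc x hx).2.1
    rw [PySem.Dict.contains_eq_decide_mem_keys] at h
    exact of_decide_eq_true h
  calc p.length = p.toFinset.card := (List.toFinset_card_of_nodup hnd).symm
    _ ≤ ((PySem.Dict.mk m).keys).toFinset.card := by
        apply Finset.card_le_card
        intro x hx
        exact List.mem_toFinset.mpr (hsub (List.mem_toFinset.mp hx))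
    _ ≤ ((PySem.Dict.mk m).keys).length := List.toFinset_card_le _
    _ ≤ m.length := by simp [PySem.Dict.keys]

theorem pv_foldl_congr {α β : Type} {l : List α} {f g : β → α → β} (i : β)
    (h : ∀ s, ∀ a ∈ l, f s a = g s a) : l.foldl f i = l.foldl g i := by
  induction l generalizing i with
  | nil => rfl
  | cons a l ih => simp only [List.foldl_cons, h i a (by simp)]; exact ih _ fun s a ha => h s a (by simp [ha])

-- fuel irrelevance for A's recursion: any fuel ≥ (length + 1 - depth) gives the same value
theorem pvA_stable {m : List (String × List String)} {bag : String}
    (hPre : Pre_get_enclosing_bags_recursive m bag) :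
    ∀ (f : Nat) (p : List String) (b : String), pvInv m bag p b →
      m.length + 1 - p.length ≤ f →
      pvRecA m f b = pvRecA m (m.length + 1 - p.length) b := by
  intro f
  induction f using Nat.strong_induction_on with
  | _ f ih =>
    intro p b hInv hf
    have hp : p.length ≤ m.length := pvInv_length hInv
    obtain ⟨f', rfl⟩ : ∃ f', f = f' + 1 := ⟨f - 1, by omega⟩
    obtain ⟨d', hd'⟩ : ∃ d', m.length + 1 - p.length = d' + 1 := ⟨m.length - p.length, by omega⟩
    rw [hd']
    by_cases hb : (PySem.Dict.mk m).contains b = false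
    · simp [pvRecA, hb]
    · have hb' : (PySem.Dict.mk m).contains b = true := by
        cases h : (PySem.Dict.mk m).contains b with
        | false => exact absurd h hb
        | true => rfl
      simp only [pvRecA, hb', Bool.true_eq_false, if_false]
      apply pv_foldl_congr
      intro s c hc
      have hInv' : pvInv m bag (b :: p) c := pvInv_extend hPre hInv hb' hc
      have h1 : pvRecA m f' c = pvRecA m (m.length + 1 - (b :: p).length) c :=
        ih f' (by omega) (b :: p) c hInv' (by simp only [List.length_cons]; omega)
      have h2 : pvRecA m d' c = pvRecA m (m.length + 1 - (b :: p).length) c :=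
        ih d' (by omega) (b :: p) c hInv' (by simp only [List.length_cons]; omega)
      rw [h1, h2]

-- the canonical value of A's recursion at a node
def pvVal (m : List (String × List String)) (b : String) : List String :=
  pvRecA m (m.length + 1) b

theorem pvA_val {m : List (String × List String)} {bag : String}
    (hPre : Pre_get_enclosing_bags_recursive m bag) {f : Nat} {p : List String} {b : String}
    (hInv : pvInv m bag p b) (hf : m.length + 1 - p.length ≤ f) :
    pvRecA m f b = pvVal m b := by
  rw [pvA_stable hPre f p b hInv hf, pvVal, pvA_stable hPre (m.length + 1) p b hInv (by omega)]

theorem pvVal_unfold {m : List (String × List String)} {bag : String}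
    (hPre : Pre_get_enclosing_bags_recursive m bag) {p : List String} {b : String}
    (hInv : pvInv m bag p b) (hb : (PySem.Dict.mk m).contains b = true) :
    pvVal m b =
      (pvKids m b).foldl
        (fun s c => PySem.Set.union (PySem.Set.add s c) (pvVal m c)) PySem.Set.empty := by
  rw [pvVal]
  simp only [pvRecA, hb, Bool.true_eq_false, if_false]
  apply pv_foldl_congr
  intro s c hc
  have hInv' : pvInv m bag (b :: p) c := pvInv_extend hPre hInv hb hc
  rw [pvA_val hPre hInv' (by simp only [List.length_cons]; omega)]

theorem pvVal_of_not_contains {m : List (String × List String)} {b : String}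
    (hb : (PySem.Dict.mk m).contains b = false) : pvVal m b = PySem.Set.empty := by
  simp [pvVal, pvRecA, hb]

theorem pvKids_of_not_contains {m : List (String × List String)} {b : String}
    (hb : (PySem.Dict.mk m).contains b = false) : pvKids m b = [] := by
  have : (PySem.Dict.mk m).get? b = none := by
    cases h : (PySem.Dict.mk m).get? b with
    | none => rfl
    | some v =>
      rw [PySem.Dict.contains_eq_isSome_get?, h] at hb
      simp at hb
  simp [pvKids, this]

def pvGoodC (m : List (String × List String)) (cache : PySem.Dict String (List String)) : Prop :=
  ∀ k v, cache.get? k = some v → v = pvVal m k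

theorem pvGoodC_insert {m : List (String × List String)} {cache : PySem.Dict String (List String)}
    {b : String} (hG : pvGoodC m cache) : pvGoodC m (cache.insert b (pvVal m b)) := by
  intro k v hkv
  rw [PySem.Dict.get?_insert] at hkv
  by_cases hk : k = b
  · subst hk; rw [if_pos rfl] at hkv
    exact (Option.some_inj.mp hkv).symm
  · rw [if_neg hk] at hkv; exact hG k v hkv

theorem pvB_val {m : List (String × List String)} {bag : String}
    (hPre : Pre_get_enclosing_bags_recursive m bag) :
    ∀ (f : Nat) (p : List String) (b : String) (cache : PySem.Dict String (List String)),
      pvInv m bag p b → m.length + 1 - p.length ≤ f → pvGoodC m cache →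
      (pvRecB m f cache b).1 = pvVal m b ∧ pvGoodC m (pvRecB m f cache b).2 := by
  intro f
  induction f using Nat.strong_induction_on with
  | _ f ih =>
    intro p b cache hInv hf hG
    have hp : p.length ≤ m.length := pvInv_length hInv
    obtain ⟨f', rfl⟩ : ∃ f', f = f' + 1 := ⟨f - 1, by omega⟩
    cases hcb : cache.get? b with
    | some s =>
      simp only [pvRecB, hcb]
      exact ⟨hG b s hcb, hG⟩
    | none =>
      have hstep : ∀ (cache' : PySem.Dict String (List String)) (c : String), c ∈ pvKids m b →
          pvGoodC m cache' →
          (pvRecB m f' cache' c).1 = pvVal m c ∧ pvGoodC m (pvRecB m f' cache' c).2 := by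
        intro cache' c hc hG'
        by_cases hb : (PySem.Dict.mk m).contains b = true
        · exact ih f' (by omega) (b :: p) c cache' (pvInv_extend hPre hInv hb hc)
            (by simp only [List.length_cons]; omega) hG'
        · exfalso
          have : pvKids m b = [] := pvKids_of_not_contains (by
            cases h : (PySem.Dict.mk m).contains b with
            | false => rfl
            | true => exact absurd h hb)
          simp [this] at hc
      have hfold : ∀ (cs : List String), (∀ c ∈ cs, c ∈ pvKids m b) →
          ∀ (s : List String) (cache' : PySem.Dict String (List String)), pvGoodC m cache' →
          (cs.foldl
              (fun (acc : List String × PySem.Dict String (List String)) item =>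
                (PySem.Set.union (PySem.Set.add acc.1 item) (pvRecB m f' acc.2 item).1,
                 (pvRecB m f' acc.2 item).2))
              (s, cache')).1
            = cs.foldl (fun s c => PySem.Set.union (PySem.Set.add s c) (pvVal m c)) s ∧
          pvGoodC m
            (cs.foldl
              (fun (acc : List String × PySem.Dict String (List String)) item =>
                (PySem.Set.union (PySem.Set.add acc.1 item) (pvRecB m f' acc.2 item).1,
                 (pvRecB m f' acc.2 item).2))
              (s, cache')).2 := by
        intro cs
        induction cs with
        | nil => intro _ s cache' hG'; exact ⟨rfl, hG'⟩
        | cons c cs ihcs =>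
          intro hcs s cache' hG'
          obtain ⟨hc1, hG1⟩ := hstep cache' c (hcs c (by simp)) hG'
          simp only [List.foldl_cons, hc1]
          exact ihcs (fun c' hc' => hcs c' (by simp [hc'])) _ _ hG1
      obtain ⟨hres, hGfin⟩ := hfold (pvKids m b) (fun c hc => hc) PySem.Set.empty cache hG
      have hval : (((pvKids m b).foldl
          (fun (acc : List String × PySem.Dict String (List String)) item =>
            (PySem.Set.union (PySem.Set.add acc.1 item) (pvRecB m f' acc.2 item).1,
             (pvRecB m f' acc.2 item).2))
          (PySem.Set.empty, cache)).1) = pvVal m b := by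
        rw [hres]
        by_cases hb : (PySem.Dict.mk m).contains b = true
        · exact (pvVal_unfold hPre hInv hb).symm
        · have hbf : (PySem.Dict.mk m).contains b = false := by
            cases h : (PySem.Dict.mk m).contains b with
            | false => rfl
            | true => exact absurd h hb
          rw [pvKids_of_not_contains hbf, pvVal_of_not_contains hbf]
          rfl
      constructor
      · simp only [pvRecB, hcb]
        exact hval
      · simp only [pvRecB, hcb]
        rw [hval]
        exact pvGoodC_insert hGfin

-- ===== VERDICT (by name: the statement is the Claim_ definition above) =====
theorem get_enclosing_bags_recursive_spec : Claim_equal_get_enclosing_bags_recursive := by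
  intro m bag _hDom hPre
  unfold Spec_get_enclosing_bags_recursive get_enclosing_bags_recursive get_enclosing_bags_recursive_alt
  have hInv : pvInv m bag [] bag := by
    refine ⟨pv_mem_grow_base m _ _ bag (by simp), List.nodup_nil, ?_⟩
    intro x hx; simp at hx
  have hG : pvGoodC m PySem.Dict.empty := by
    intro k v hkv
    rw [PySem.Dict.get?_empty] at hkv
    exact absurd hkv (by simp)
  have := (pvB_val hPre (m.length + 1) [] bag PySem.Dict.empty hInv (by simp) hG).1
  rw [this, pvVal]
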